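-- pv_equiv track=rewrite | github.com/lee-seongmin/coding_test_practice | resque_boat.py | solution
-- ===== SOURCE A (Python) =====
-- def solution(people, limit):
--     lst = []
--     cnt = 0
--
--     for i in range(len(people)):
--         for j in range(i+1, len(people)):
--             if (people[i]+people[j]) <= limit:
--                 cnt+=1
--
--     return len(people)-cnt
-- ===== SOURCE B (Python) =====
-- def solution(people, limit):
--     a = sorted(people)
--     cnt = 0
--     l, r = 0, len(a) - 1
--     while l < r:
--         if a[l] + a[r] <= limit:
--             cnt += r - l
--             l += 1
--         else:
--             r -= 1
--     return len(people) - cnt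
-- ===== Notes on version B (the rewrite author's own statement) =====
-- stated objective: faster
-- what changed: Replaced the O(n^2) nested index loops counting pairs with sum <= limit by sort + two pointers from both ends of the sorted list, counting r-l pairs at once when a[l]+a[r] <= limit.
import Mathlib
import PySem

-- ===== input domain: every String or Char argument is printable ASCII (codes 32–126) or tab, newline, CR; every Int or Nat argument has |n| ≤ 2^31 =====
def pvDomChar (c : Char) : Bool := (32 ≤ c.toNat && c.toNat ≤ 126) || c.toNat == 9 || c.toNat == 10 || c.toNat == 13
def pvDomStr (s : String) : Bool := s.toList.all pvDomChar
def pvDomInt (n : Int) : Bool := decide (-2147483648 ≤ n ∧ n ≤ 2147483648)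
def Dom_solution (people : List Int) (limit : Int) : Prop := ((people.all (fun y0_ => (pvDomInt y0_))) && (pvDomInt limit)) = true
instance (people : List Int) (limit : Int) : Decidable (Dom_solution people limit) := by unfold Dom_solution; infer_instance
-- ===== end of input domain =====

-- B replaces A's O(n^2) nested index loops by sort + two pointers (objective: faster).

-- ===== PORT A =====
-- A's 'lst = []' is never used; the nested for-loops count pairs i<j with people[i]+people[j] <= limit.
def solution (people : List Int) (limit : Int) : Int :=
  let cnt : Int :=
    (PySem.List.pyRange 0 (PySem.List.len people) 1).foldl (fun cnt i =>
      (PySem.List.pyRange (i + 1) (PySem.List.len people) 1).foldl (fun cnt j =>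
        if PySem.List.pyGetD people i 0 + PySem.List.pyGetD people j 0 ≤ limit then cnt + 1
        else cnt) cnt) 0
  PySem.List.len people - cnt

-- ===== PORT B =====
-- the 'while l < r' loop of Source B (indices and cnt are Python ints)
def tpLoop (a : List Int) (limit : Int) (l r cnt : Int) : Int :=
  if l < r then
    if PySem.List.pyGetD a l 0 + PySem.List.pyGetD a r 0 ≤ limit then
      tpLoop a limit (l + 1) r (cnt + (r - l))
    else
      tpLoop a limit l (r - 1) cnt
  else cnt
termination_by (r - l).toNat
decreasing_by all_goals omega

def solution_alt (people : List Int) (limit : Int) : Int :=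
  let a := PySem.List.sorted people (fun x => x) false
  PySem.List.len people - tpLoop a limit 0 (PySem.List.len a - 1) 0

-- ===== PRECONDITION & SPEC =====
def Spec_solution (people : List Int) (limit : Int) (out : Int) : Prop := out = solution_alt people limit
instance (people : List Int) (limit : Int) (out : Int) : Decidable (Spec_solution people limit out) := by unfold Spec_solution; infer_instance

-- ===== CLAIM (what is proved, stated in full; the proofs are below) =====
def Claim_equal_solution : Prop := ∀ (people : List Int) (limit : Int), Dom_solution people limit → Spec_solution people limit (solution people limit)

-- ===== LEMMAS AND PROOFS =====

-- number of pairs i<j with sum ≤ limit, as a structural recursion (the common spec of both ports)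
def pcnt (limit : Int) : List Int → Int
  | [] => 0
  | x :: xs => (xs.countP (fun y => decide (x + y ≤ limit)) : Int) + pcnt limit xs

theorem pcnt_cons (limit x : Int) (xs : List Int) :
    pcnt limit (x :: xs) = (xs.countP (fun y => decide (x + y ≤ limit)) : Int) + pcnt limit xs := rfl

theorem pcnt_short (limit : Int) (xs : List Int) (h : xs.length ≤ 1) : pcnt limit xs = 0 := by
  match xs, h with
  | [], _ => rfl
  | [x], _ => simp [pcnt]

theorem pcnt_append_singleton (limit z : Int) (ys : List Int) :
    pcnt limit (ys ++ [z]) = pcnt limit ys + (ys.countP (fun y => decide (y + z ≤ limit)) : Int) := by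
  induction ys with
  | nil => simp [pcnt]
  | cons x ys ih =>
    simp [pcnt, List.countP_append, List.countP_cons, ih]
    ring

theorem pcnt_perm (limit : Int) {xs ys : List Int} (h : xs.Perm ys) : pcnt limit xs = pcnt limit ys := by
  induction h with
  | nil => rfl
  | cons x h ih => simp [pcnt, ih, h.countP_eq]
  | swap x y l =>
    simp [pcnt, List.countP_cons]
    rw [show y + x = x + y from Int.add_comm y x]
    ring
  | trans _ _ ih1 ih2 => omega

theorem sumSpec (limit : Int) (l : List Int) :
    (((List.range l.length).map (fun i =>
        (((l.drop (i + 1)).countP (fun y => decide (l.getD i 0 + y ≤ limit))) : Int))).sum)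
      = pcnt limit l := by
  induction l with
  | nil => simp [pcnt]
  | cons x xs ih =>
    rw [List.length_cons, List.range_succ_eq_map]
    simp only [List.map_cons, List.map_map, Function.comp_def, List.getD_cons_succ,
      List.drop_succ_cons, List.getD_cons_zero, List.sum_cons, pcnt, ih]
    simp

theorem solution_eq (people : List Int) (limit : Int) :
    solution people limit = (people.length : Int) - pcnt limit people := by
  unfold solution
  simp only [PySem.List.len_eq]
  congr 1
  rw [PySem.List.foldl_congr_mem'
      (g := fun (cnt : Int) (i : Int) =>
        cnt + (((people.drop (i + 1).toNat).countP
          (fun y => decide (PySem.List.pyGetD people i 0 + y ≤ limit))) : Int))]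
  · rw [PySem.List.foldl_add, PySem.List.pyRange_zero_natCast]
    simp only [List.map_map, Function.comp_def, PySem.List.pyGetD_natCast]
    rw [← sumSpec limit people, zero_add]
    congr 1
  · intro i hi cnt
    have h0 : (0:Int) ≤ i := (PySem.List.mem_pyRange_one.mp hi).1
    have h1 := PySem.List.foldl_pyRange_pyGetD' (xs := people) (d := 0) (a := i + 1)
      (f := fun (acc y : Int) => if PySem.List.pyGetD people i 0 + y ≤ limit then acc + 1 else acc)
      (init := cnt) (by omega)
    exact h1.trans (PySem.List.foldl_ite_add_one _ _ _)

theorem sorted_mono {a : List Int} (h : a.Pairwise (· ≤ ·)) {i j : Nat} (hij : i ≤ j)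
    (hj : j < a.length) : a[i]'(by omega) ≤ a[j] := by
  rcases Nat.lt_or_ge i j with hlt | hge
  · exact List.pairwise_iff_getElem.mp h i j (by omega) hj hlt
  · have : i = j := by omega
    subst this; exact le_refl _

-- every element of the segment (drop l).take m of a sorted list is between a[l] and a[l+m-1]

theorem seg_bounds {a : List Int} (h : a.Pairwise (· ≤ ·)) (l m : Nat) (hm : 0 < m)
    (hend : l + m ≤ a.length) :
    ∀ y ∈ (a.drop l).take m, a[l]'(by omega) ≤ y ∧ y ≤ a[l + m - 1]'(by omega) := by
  intro y hy
  rw [List.mem_iff_getElem] at hy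
  obtain ⟨k, hk, hyk⟩ := hy
  have hk2 : k < m := by
    have := hk; simp [List.length_take, List.length_drop] at this; omega
  have hk3 : l + k < a.length := by
    have := hk; simp [List.length_take, List.length_drop] at this; omega
  have : y = a[l + k]'(hk3) := by
    rw [← hyk]; rw [List.getElem_take, List.getElem_drop]
  subst this
  constructor
  · exact sorted_mono h (Nat.le_add_right l k) hk3
  · exact sorted_mono h (by omega) (by omega)

theorem tp_eq (a : List Int) (limit : Int) (hs : a.Pairwise (· ≤ ·)) :
    ∀ (l r cnt : Int), 0 ≤ l → r < (a.length : Int) →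
      tpLoop a limit l r cnt = cnt + pcnt limit ((a.drop l.toNat).take (r - l + 1).toNat) := by
  have main : ∀ (n : Nat) (l r cnt : Int), (r - l).toNat = n → 0 ≤ l → r < (a.length : Int) →
      tpLoop a limit l r cnt = cnt + pcnt limit ((a.drop l.toNat).take (r - l + 1).toNat) := by
    intro n
    induction n using Nat.strong_induction_on with
    | _ n ih =>
      intro l r cnt hn hl hr
      by_cases hlr : l < r
      · have hl2 : l.toNat < a.length := by omega
        have hr2 : r.toNat < a.length := by omega
        rw [tpLoop, if_pos hlr,
          PySem.List.pyGetD_eq_getElem a (i := l) 0 hl (by omega),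
          PySem.List.pyGetD_eq_getElem a (i := r) 0 (by omega) (by omega)]
        have hdrop : a.drop l.toNat = a[l.toNat] :: a.drop (l.toNat + 1) :=
          List.drop_eq_getElem_cons hl2
        by_cases hcond : a[l.toNat] + a[r.toNat] ≤ limit
        · rw [if_pos hcond]
          rw [ih (r - (l + 1)).toNat (by omega) (l + 1) r (cnt + (r - l)) rfl (by omega) hr]
          -- seg l r = a[l] :: seg (l+1) r
          have hseg : (a.drop l.toNat).take (r - l + 1).toNat
              = a[l.toNat] :: (a.drop ((l + 1).toNat)).take (r - (l + 1) + 1).toNat := by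
            rw [hdrop]
            have h1 : (r - l + 1).toNat = (r - (l + 1) + 1).toNat + 1 := by omega
            have h2 : (l + 1).toNat = l.toNat + 1 := by omega
            rw [h1, h2, List.take_succ_cons]
          rw [hseg, pcnt_cons]
          have hall : ∀ y ∈ (a.drop ((l + 1).toNat)).take (r - (l + 1) + 1).toNat,
              a[l.toNat] + y ≤ limit := by
            intro y hy
            have hb := seg_bounds hs (l.toNat + 1) (r - l).toNat (by omega) (by omega) y
              (by rw [show (l + 1).toNat = l.toNat + 1 by omega,
                      show (r - (l + 1) + 1).toNat = (r - l).toNat by omega] at hy; exact hy)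
            have hyz : y ≤ a[l.toNat + 1 + (r - l).toNat - 1]'(by omega) := hb.2
            have heq : a[l.toNat + 1 + (r - l).toNat - 1]'(by omega) = a[r.toNat] := by
              congr 1
              omega
            have hyz2 : y ≤ a[r.toNat] := le_trans hyz (le_of_eq heq)
            omega
          have hcount : ((a.drop ((l + 1).toNat)).take (r - (l + 1) + 1).toNat).countP
              (fun y => decide (a[l.toNat] + y ≤ limit))
              = ((a.drop ((l + 1).toNat)).take (r - (l + 1) + 1).toNat).length := by
            rw [List.countP_eq_length]
            intro y hy
            simpa using hall y hy
          have hlen : ((a.drop ((l + 1).toNat)).take (r - (l + 1) + 1).toNat).length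
              = (r - l).toNat := by
            rw [List.length_take, List.length_drop]
            omega
          rw [hcount, hlen]
          omega
        · rw [if_neg hcond]
          rw [ih (r - 1 - l).toNat (by omega) l (r - 1) cnt rfl hl (by omega)]
          -- seg l r = seg l (r-1) ++ [a[r]]
          have hlen2 : (r - l).toNat < (a.drop l.toNat).length := by
            simp [List.length_drop]; omega
          have hseg : (a.drop l.toNat).take (r - l + 1).toNat
              = (a.drop l.toNat).take (r - 1 - l + 1).toNat ++ [(a.drop l.toNat)[(r - l).toNat]] := by
            have h1 : (r - l + 1).toNat = (r - l).toNat + 1 := by omega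
            have h2 : (r - 1 - l + 1).toNat = (r - l).toNat := by omega
            rw [h1, h2, List.take_add_one, List.getElem?_eq_getElem hlen2]
            rfl
          have hget : (a.drop l.toNat)[(r - l).toNat] = a[r.toNat] := by
            rw [List.getElem_drop]
            congr 1
            omega
          rw [hseg, hget, pcnt_append_singleton]
          have hzero : ((a.drop l.toNat).take (r - 1 - l + 1).toNat).countP
              (fun y => decide (y + a[r.toNat] ≤ limit)) = 0 := by
            rw [List.countP_eq_zero]
            intro y hy
            have hb := seg_bounds hs l.toNat (r - l).toNat (by omega) (by omega) y
              (by rw [show (r - 1 - l + 1).toNat = (r - l).toNat by omega] at hy; exact hy)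
            have hxy : a[l.toNat] ≤ y := hb.1
            simp
            omega
          rw [hzero]
          omega
      · rw [tpLoop, if_neg hlr]
        have : ((a.drop l.toNat).take (r - l + 1).toNat).length ≤ 1 := by
          simp [List.length_take, List.length_drop]
          omega
        rw [pcnt_short limit _ this]
        omega
  intro l r cnt hl hr
  exact main (r - l).toNat l r cnt rfl hl hr

theorem solution_alt_eq (people : List Int) (limit : Int) :
    solution_alt people limit =
      (people.length : Int) - pcnt limit (PySem.List.sorted people (fun x => x) false) := by
  unfold solution_alt
  simp only [PySem.List.len_eq]
  congr 1
  rw [tp_eq _ limit (PySem.List.sorted_pairwise people (fun x => x)) 0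
    (((PySem.List.sorted people (fun x => x) false).length : Int) - 1) 0 le_rfl (by omega)]
  rw [zero_add]
  congr 1
  rw [show (((PySem.List.sorted people (fun x => x) false).length : Int) - 1 - 0 + 1).toNat
      = (PySem.List.sorted people (fun x => x) false).length by omega]
  simp

-- ===== VERDICT (by name: the statement is the Claim_ definition above) =====
theorem solution_spec : Claim_equal_solution := by
  intro people limit _
  unfold Spec_solution
  rw [solution_eq, solution_alt_eq, pcnt_perm limit (PySem.List.sorted_perm people (fun x => x) false)]
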